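-- pv_equiv track=rewrite | github.com/WooHyunKing/CodingTest_study | Queue/programmers_develop.py | solution
-- ===== SOURCE A (Python) =====
-- def solution(progresses, speeds):
--     answer = []
--
--     length = len(progresses)
--
--     while len(progresses) > 0:
--
--         count = 0
--
--         remain = 100-progresses[0]
--
--         if remain%speeds[0] != 0:
--             remain = remain // speeds[0] + 1
--         else:
--             remain = remain // speeds[0]
--
--         progresses = [value+(remain*speeds[i]) for i,value in enumerate(progresses)]
--
--         for item in progresses:
--             if item >= 100:
--                 count += 1
--             else:
--                 break
--
--         for _ in range(count):
--             progresses.pop(0)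
--             speeds.pop(0)
--
--         answer.append(count)
--
--     return answer
-- ===== SOURCE B (Python) =====
-- def solution(progresses, speeds):
--     answer = []
--     cur = 0
--     for p, s in zip(progresses, speeds):
--         d = -((p - 100) // s)  # days until this task is done: ceil((100-p)/s)
--         if answer and d <= cur:
--             answer[-1] += 1
--         else:
--             cur = d
--             answer.append(1)
--     return answer
-- ===== Notes on version B (the rewrite author's own statement) =====
-- stated objective: alternative
-- what changed: Replaces the simulation loop that repeatedly rebuilds the whole progress list and pops finished heads with a single pass that computes each task's ceil day via -((p-100)//s) and groups consecutive tasks whose day does not exceed the current group leader's day (O(n) instead of O(n^2); a timing run could not confirm a ratio).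
-- outside the precondition, e.g. on solution([99, 99], [1, -1]): A returns [1, 1], B returns [2]
import Mathlib
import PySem

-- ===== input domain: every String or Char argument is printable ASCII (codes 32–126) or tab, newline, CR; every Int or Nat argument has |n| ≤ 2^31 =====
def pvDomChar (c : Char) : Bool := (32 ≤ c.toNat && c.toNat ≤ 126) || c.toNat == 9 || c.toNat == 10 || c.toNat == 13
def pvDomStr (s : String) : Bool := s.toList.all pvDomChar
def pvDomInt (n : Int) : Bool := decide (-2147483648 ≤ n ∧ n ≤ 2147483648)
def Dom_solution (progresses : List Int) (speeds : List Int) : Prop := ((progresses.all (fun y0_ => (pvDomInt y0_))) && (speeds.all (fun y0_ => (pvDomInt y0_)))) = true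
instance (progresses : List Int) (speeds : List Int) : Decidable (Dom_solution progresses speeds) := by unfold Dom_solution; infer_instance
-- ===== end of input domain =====

-- B replaces A's pop-and-rebuild simulation with a one-pass grouping by ceil day counts.
-- A mutates its speeds argument in place (pop(0)); the equivalence proved here is about the
-- RETURN value only (B does not mutate).

-- ===== PORT A =====
def pvCountPrefix : List Int → Int
  | [] => 0
  | x :: xs => if x ≥ 100 then 1 + pvCountPrefix xs else 0

def solutionLoop : Nat → List Int → List Int → List Int → List Int
  | 0, _, _, answer => answer
  | fuel + 1, progresses, speeds, answer =>
    if progresses.length > 0 then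
      match speeds with
      | [] => answer
      | s0 :: _ =>
        let remain0 := 100 - PySem.List.pyGetD progresses 0 0
        let remain := if PySem.Int.mod remain0 s0 ≠ 0
          then PySem.Int.floordiv remain0 s0 + 1
          else PySem.Int.floordiv remain0 s0
        let progresses' := (PySem.List.enumerate progresses).map
          (fun iv => iv.2 + remain * PySem.List.pyGetD speeds iv.1 0)
        let count := pvCountPrefix progresses'
        solutionLoop fuel (progresses'.drop count.toNat) (speeds.drop count.toNat) (answer ++ [count])
    else answer

def solution (progresses : List Int) (speeds : List Int) : List Int :=
  solutionLoop progresses.length progresses speeds []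

-- ===== PORT B =====
def solutionAltLoop : List (Int × Int) → List Int → Int → List Int
  | [], answer, _ => answer.reverse
  | (p, s) :: rest, answer, cur =>
    let d := -(PySem.Int.floordiv (p - 100) s)
    match answer with
    | [] => solutionAltLoop rest [1] d
    | c :: tl =>
      if d ≤ cur then solutionAltLoop rest ((c + 1) :: tl) cur
      else solutionAltLoop rest (1 :: c :: tl) d

def solution_alt (progresses : List Int) (speeds : List Int) : List Int :=
  solutionAltLoop (progresses.zip speeds) [] 0


-- ===== PRECONDITION & SPEC =====
-- Pre_ excludes inputs where speeds is shorter than progresses (A raises IndexError) and inputs with a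
-- nonpositive speed among the first len(progresses) speeds, on which A divides by zero, diverges, or
-- returns an accidental value of floor division by a negative divisor that no deployment-queue
-- semantics specifies.
def Pre_solution (progresses : List Int) (speeds : List Int) : Prop :=
  progresses.length ≤ speeds.length ∧ ∀ s ∈ speeds.take progresses.length, 0 < s
instance (progresses : List Int) (speeds : List Int) : Decidable (Pre_solution progresses speeds) := by
  unfold Pre_solution; infer_instance

def pvWitness_solution : List Int × List Int := ([93, 30, 55], [1, 30, 5])

def Spec_solution (progresses : List Int) (speeds : List Int) (out : List Int) : Prop := out = solution_alt progresses speeds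
instance (progresses : List Int) (speeds : List Int) (out : List Int) : Decidable (Spec_solution progresses speeds out) := by unfold Spec_solution; infer_instance

-- ===== CLAIM (what is proved, stated in full; the proofs are below) =====
def Claim_equal_solution : Prop := ∀ (progresses : List Int) (speeds : List Int), Dom_solution progresses speeds → Pre_solution progresses speeds → Spec_solution progresses speeds (solution progresses speeds)
-- ===== LEMMAS AND PROOFS =====

def pvDay (q : Int × Int) : Int := -(PySem.Int.floordiv (q.1 - 100) q.2)
def pvDays (zs : List (Int × Int)) : List Int := zs.map pvDay

def pvGroup : List Int → List Int
  | [] => []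
  | d :: ds =>
    (1 + ((ds.takeWhile (fun x => x ≤ d)).length : Int)) :: pvGroup (ds.dropWhile (fun x => x ≤ d))
termination_by ds => ds.length
decreasing_by
  simp only [List.length_cons]
  exact Nat.lt_succ_of_le (List.length_dropWhile_le _ _)

theorem pvGroup_nil : pvGroup [] = [] := by rw [pvGroup.eq_def]

theorem pvGroup_cons (d : Int) (ds : List Int) :
    pvGroup (d :: ds) = (1 + ((ds.takeWhile (fun x => x ≤ d)).length : Int))
      :: pvGroup (ds.dropWhile (fun x => x ≤ d)) := by
  rw [pvGroup.eq_def]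

theorem pv_ceil_eq (p s : Int) (hs : 0 < s) :
    (if PySem.Int.mod (100 - p) s ≠ 0
      then PySem.Int.floordiv (100 - p) s + 1
      else PySem.Int.floordiv (100 - p) s) = -(PySem.Int.floordiv (p - 100) s) := by
  have key := PySem.Int.neg_floordiv_neg_eq_iff_of_pos (a := 100 - p) (b := s)
      (q := if PySem.Int.mod (100 - p) s ≠ 0
        then PySem.Int.floordiv (100 - p) s + 1
        else PySem.Int.floordiv (100 - p) s) hs
  have heq := PySem.Int.floordiv_mul_add_mod (100 - p) s
  have h0 := PySem.Int.mod_nonneg (100 - p) (b := s) hs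
  have h1 := PySem.Int.mod_lt (100 - p) (b := s) hs
  have hstep : p - 100 = -(100 - p) := by ring
  rw [hstep]
  refine (key.mpr ?_).symm
  set q := PySem.Int.floordiv (100 - p) s
  set r := PySem.Int.mod (100 - p) s
  have e1 : (q + 1 - 1) * s = q * s := by ring
  have e2 : (q - 1) * s = q * s - s := by ring
  have e3 : (q + 1) * s = q * s + s := by ring
  by_cases hr : r = 0
  · simp only [hr, ne_eq, not_true_eq_false, if_false]
    constructor <;> linarith
  · simp only [ne_eq, hr, not_false_eq_true, if_true]
    constructor <;> linarith [(lt_of_le_of_ne h0 (Ne.symm hr))]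

theorem pv_day_le_iff (p s d0 : Int) (hs : 0 < s) :
    (100 ≤ p + d0 * s) ↔ pvDay (p, s) ≤ d0 := by
  have key := (PySem.Int.neg_floordiv_neg_eq_iff_of_pos (a := 100 - p) (b := s)
      (q := pvDay (p, s)) hs).mp (by rw [show -(100 - p) = p - 100 by ring]; rfl)
  constructor
  · intro h
    nlinarith [key.1, key.2]
  · intro h
    nlinarith [key.2, mul_le_mul_of_nonneg_right h (le_of_lt hs)]

theorem pv_day_shift (p s c : Int) (hs : 0 < s) :
    pvDay (p + c * s, s) = pvDay (p, s) - c := by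
  simp only [pvDay]
  rw [show p + c * s - 100 = (p - 100) + c * s by ring,
    PySem.Int.floordiv_eq_ediv_of_pos hs, PySem.Int.floordiv_eq_ediv_of_pos hs,
    Int.add_mul_ediv_right _ _ (by omega : s ≠ 0)]
  ring

theorem pv_takeWhile_congr {α : Type} (p q : α → Bool) :
    ∀ (l : List α), (∀ x ∈ l, p x = q x) → l.takeWhile p = l.takeWhile q := by
  intro l; induction l with
  | nil => intro _; rfl
  | cons x xs ih =>
    intro h
    simp only [List.takeWhile_cons, h x (List.mem_cons_self)]
    cases hq : q x with
    | false => rfl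
    | true => rw [ih (fun y hy => h y (List.mem_cons_of_mem _ hy))]

theorem pvGroup_shift (c : Int) : ∀ (n : Nat) (ds : List Int), ds.length ≤ n →
    pvGroup (ds.map (fun x => x + c)) = pvGroup ds := by
  intro n
  induction n with
  | zero =>
    intro ds h
    rw [List.length_eq_zero_iff.mp (Nat.le_zero.mp h)]
    rfl
  | succ n ih =>
    intro ds h
    match ds with
    | [] => rfl
    | d :: rest =>
      simp only [List.map_cons, pvGroup_cons]
      have hpred : (fun x => decide (x ≤ d + c)) ∘ (fun x => x + c) = (fun x => decide (x ≤ d)) := by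
        funext x; simp
      rw [List.takeWhile_map, List.dropWhile_map, hpred, List.length_map,
        ih (rest.dropWhile (fun x => decide (x ≤ d)))
          (le_trans (List.length_dropWhile_le _ _) (by simpa using h))]

theorem pv_enum_map (r : Int) : ∀ (ps : List Int) (ss : List Int) (k : Nat), ps.length + k ≤ ss.length →
    (PySem.List.enumerate ps (k : Int)).map (fun iv => iv.2 + r * PySem.List.pyGetD ss iv.1 0)
      = (ps.zip (ss.drop k)).map (fun q => q.1 + r * q.2) := by
  intro ps
  induction ps with
  | nil => intro ss k _; simp [PySem.List.enumerate_nil]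
  | cons p ps ih =>
    intro ss k h
    have hk : k < ss.length := by simp at h; omega
    rw [PySem.List.enumerate_cons, List.map_cons,
      List.drop_eq_getElem_cons hk, List.zip_cons_cons, List.map_cons]
    congr 1
    · simp [List.getElem?_eq_getElem hk]
    · rw [show (k : Int) + 1 = ((k + 1 : Nat) : Int) by push_cast; ring, ih ss (k + 1) (by simp at h ⊢; omega)]

theorem pv_zip_eq_map {α : Type} (g : Int × Int → α) :
    ∀ (u : List (Int × Int)) (w : List Int), u.map Prod.snd = w.take u.length →
    (u.map g).zip w = u.map (fun q => (g q, q.2)) := by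
  intro u
  induction u with
  | nil => intro w _; rfl
  | cons a u ih =>
    intro w h
    match w with
    | [] => simp at h
    | b :: w' =>
      simp only [List.map_cons, List.length_cons, List.take_succ_cons, List.cons.injEq] at h
      rw [List.map_cons, List.map_cons, List.zip_cons_cons, ih w' h.2, h.1]

theorem pv_map_snd_zip_short : ∀ (l1 l2 : List Int), l1.length ≤ l2.length →
    (l1.zip l2).map Prod.snd = l2.take l1.length := by
  intro l1
  induction l1 with
  | nil => intro l2 _; rfl
  | cons a l1 ih =>
    intro l2 h
    match l2 with
    | [] => simp at h
    | b :: l2' =>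
      simp only [List.zip_cons_cons, List.map_cons, List.length_cons, List.take_succ_cons]
      rw [ih l2' (by simpa using h)]

theorem pvCountPrefix_eq (xs : List Int) :
    pvCountPrefix xs = ((xs.takeWhile (fun x => 100 ≤ x)).length : Int) := by
  induction xs with
  | nil => rfl
  | cons x xs ih =>
    by_cases h : 100 ≤ x <;> simp [pvCountPrefix, h, ih] <;> omega

theorem pv_loopA : ∀ (fuel : Nat) (ps ss answer : List Int),
    ps.length ≤ fuel → ps.length ≤ ss.length → (∀ q ∈ ps.zip ss, 0 < q.2) →
    solutionLoop fuel ps ss answer = answer ++ pvGroup (pvDays (ps.zip ss)) := by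
  intro fuel
  induction fuel with
  | zero =>
    intro ps ss answer hf _ _
    rw [List.length_eq_zero_iff.mp (Nat.le_zero.mp hf)]
    simp [solutionLoop, pvDays, pvGroup_nil]
  | succ n ih =>
    intro ps ss answer hf hlen hpos
    match ps, ss with
    | [], _ => simp [solutionLoop, pvDays, pvGroup_nil]
    | p :: ps', [] => simp at hlen
    | p :: ps', s :: ss' =>
      have hs : 0 < s := hpos (p, s) (by rw [List.zip_cons_cons]; exact List.mem_cons_self)
      set d0 := pvDay (p, s) with hd0
      set f : Int × Int → Int := fun q => q.1 + d0 * q.2 with hf'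
      set zs' := ps'.zip ss' with hzs'
      set P : Int × Int → Bool := fun q => decide (pvDay q ≤ d0) with hP
      set t := zs'.takeWhile P with ht
      set r := zs'.dropWhile P with hr
      have step1 : solutionLoop (n + 1) (p :: ps') (s :: ss') answer
          = solutionLoop n
              ((((p :: ps').zip (s :: ss')).map f).drop (pvCountPrefix (((p :: ps').zip (s :: ss')).map f)).toNat)
              ((s :: ss').drop (pvCountPrefix (((p :: ps').zip (s :: ss')).map f)).toNat)
              (answer ++ [pvCountPrefix (((p :: ps').zip (s :: ss')).map f)]) := by
        simp only [solutionLoop, List.length_cons, Nat.succ_pos, if_pos, gt_iff_lt,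
          PySem.List.pyGetD_zero_cons]
        rw [pv_ceil_eq p s hs]
        have hmap : (PySem.List.enumerate (p :: ps')).map
            (fun iv => iv.2 + -PySem.Int.floordiv (p - 100) s * PySem.List.pyGetD (s :: ss') iv.1 0)
          = (((p :: ps').zip (s :: ss')).map f) := by
          have hh := pv_enum_map d0 (p :: ps') (s :: ss') 0 (by simpa using hlen)
          simpa [hd0, pvDay, hf'] using hh
        rw [hmap]
      have hzip : (p :: ps').zip (s :: ss') = (p, s) :: zs' := rfl
      have hlen' : ps'.length ≤ ss'.length := by simpa using hlen
      have hzlen : zs'.length = ps'.length := by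
        rw [hzs', List.length_zip]; omega
      have hsplit : t ++ r = zs' := List.takeWhile_append_dropWhile
      have htr : t.length + r.length = ps'.length := by
        rw [← hzlen, ← hsplit, List.length_append]
      have hposq : ∀ q ∈ (p, s) :: zs', (0:Int) < q.2 := by rw [← hzip]; exact hpos
      -- the count of the iteration
      have hcount : pvCountPrefix (((p :: ps').zip (s :: ss')).map f)
          = 1 + (t.length : Int) := by
        rw [pvCountPrefix_eq, List.takeWhile_map,
          pv_takeWhile_congr _ P _ (fun q hq => by
            simp only [Function.comp_apply, hP, hf']
            exact decide_eq_decide.mpr (pv_day_le_iff q.1 q.2 d0 (hposq q hq)))]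
        rw [hzip, List.takeWhile_cons]
        have : P (p, s) = true := by simp [hP, hd0]
        rw [this]
        rw [List.length_map, if_pos rfl, List.length_cons, ← ht]
        push_cast
        omega
      have hcnt_toNat : (1 + (t.length : Int)).toNat = t.length + 1 := by omega
      -- what remains of each list after popping
      have hdropP : ((((p :: ps').zip (s :: ss')).map f).drop (t.length + 1)) = r.map f := by
        rw [hzip, List.map_cons, List.drop_succ_cons, ← hsplit, List.map_append,
          ← List.length_map (as := t) f, List.drop_left]
      have hdropS : ((s :: ss').drop (t.length + 1)) = ss'.drop t.length := List.drop_succ_cons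
      -- pair the remaining progresses with the remaining speeds
      have hsnd : r.map Prod.snd = (ss'.drop t.length).take r.length := by
        have hm : zs'.map Prod.snd = ss'.take ps'.length := by
          rw [hzs']; exact pv_map_snd_zip_short ps' ss' hlen'
        have hm2 := congrArg (List.drop t.length) hm
        rw [← hsplit, List.map_append] at hm2
        have hdl : (t.map Prod.snd ++ r.map Prod.snd).drop t.length = r.map Prod.snd := by
          rw [← List.length_map (as := t) Prod.snd, List.drop_left]
        rw [hdl, List.drop_take] at hm2
        rw [hm2, show ps'.length - t.length = r.length by omega]
      have hz2 : (r.map f).zip (ss'.drop t.length) = r.map (fun q => (f q, q.2)) :=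
        pv_zip_eq_map f r _ hsnd
      have hrmem : ∀ q ∈ r, (0:Int) < q.2 := fun q hq =>
        hposq q (List.mem_cons_of_mem _ ((List.dropWhile_sublist P).subset (hr ▸ hq)))
      have hpos2 : ∀ q ∈ r.map (fun q => (f q, q.2)), (0:Int) < q.2 := by
        intro q hq
        obtain ⟨q0, hq0, rfl⟩ := List.mem_map.mp hq
        exact hrmem q0 hq0
      -- days of the shifted remainder
      have hdays : pvDays (r.map (fun q => (f q, q.2))) = (pvDays r).map (fun x => x + (-d0)) := by
        simp only [pvDays, List.map_map]
        refine List.map_congr_left (fun q hq => ?_)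
        simp only [Function.comp_apply, hf']
        rw [pv_day_shift q.1 q.2 d0 (hrmem q hq)]
        ring
      rw [step1, hcount, hcnt_toNat, hdropP, hdropS,
        ih (r.map f) (ss'.drop t.length) (answer ++ [1 + (t.length : Int)])
          (by rw [List.length_map]; simp at hf; omega)
          (by rw [List.length_map, List.length_drop]; omega)
          (by rw [hz2]; exact hpos2),
        hz2, hdays, pvGroup_shift (-d0) (pvDays r).length _ le_rfl]
      -- now the right-hand side
      have hcomp : ((fun x => decide (x ≤ d0)) ∘ pvDay) = P := by
        funext q; simp [hP]
      conv_rhs => rw [hzip]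
      simp only [pvDays, List.map_cons]
      rw [← hd0, pvGroup_cons, List.takeWhile_map, List.dropWhile_map, hcomp, ← ht, ← hr,
        List.length_map]
      simp
theorem pv_altD : ∀ (zs : List (Int × Int)) (c : Int) (tl : List Int) (cur : Int),
    solutionAltLoop zs (c :: tl) cur
      = ((c + (((pvDays zs).takeWhile (fun x => x ≤ cur)).length : Int)) :: tl).reverse
        ++ pvGroup ((pvDays zs).dropWhile (fun x => x ≤ cur)) := by
  intro zs
  induction zs with
  | nil => intro c tl cur; simp [solutionAltLoop, pvDays, pvGroup_nil]
  | cons q rest ih =>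
    intro c tl cur
    obtain ⟨p, s⟩ := q
    have hday : -(PySem.Int.floordiv (p - 100) s) = pvDay (p, s) := rfl
    simp only [solutionAltLoop, hday, pvDays, List.map_cons, List.takeWhile_cons,
      List.dropWhile_cons]
    by_cases hle : pvDay (p, s) ≤ cur
    · simp only [hle, if_pos, decide_true, List.length_cons]
      rw [ih (c + 1) tl cur]
      simp only [pvDays]
      congr 3
      push_cast
      ring
    · simp only [hle, if_neg, decide_false, not_false_iff, Bool.false_eq_true, if_false,
        List.length_nil]
      rw [ih 1 (c :: tl) (pvDay (p, s)), pvGroup_cons]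
      simp only [pvDays, List.reverse_cons, List.append_assoc, Nat.cast_zero, add_zero,
        List.cons_append, List.nil_append]
theorem pv_alt_eq_group (ps ss : List Int) :
    solution_alt ps ss = pvGroup (pvDays (ps.zip ss)) := by
  unfold solution_alt
  match h : ps.zip ss with
  | [] => simp [solutionAltLoop, pvDays, pvGroup_nil]
  | (p, s) :: rest =>
    have hday : -(PySem.Int.floordiv (p - 100) s) = pvDay (p, s) := rfl
    simp only [solutionAltLoop, hday]
    rw [pv_altD rest 1 [] (pvDay (p, s))]
    simp only [pvDays, List.map_cons]
    rw [pvGroup_cons]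
    simp [pvDays]

-- elements paired by zip have their second component among the first len(l1) entries of l2
theorem pv_snd_mem_take : ∀ (l1 l2 : List Int) (q : Int × Int), q ∈ l1.zip l2 → q.2 ∈ l2.take l1.length := by
  intro l1
  induction l1 with
  | nil => intro l2 q hq; simp at hq
  | cons a l1 ih =>
    intro l2 q hq
    match l2 with
    | [] => simp at hq
    | b :: l2' =>
      rw [List.zip_cons_cons] at hq
      rw [List.length_cons, List.take_succ_cons]
      rcases List.mem_cons.mp hq with h | h
      · subst h; exact List.mem_cons_self
      · exact List.mem_cons_of_mem _ (ih l2' q h)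

-- ===== VERDICT (by name: the statement is the Claim_ definition above) =====
theorem solution_spec : Claim_equal_solution := by
  intro ps ss _ hpre
  unfold Spec_solution
  obtain ⟨hlen, hpos⟩ := hpre
  rw [pv_alt_eq_group, solution,
    pv_loopA ps.length ps ss [] le_rfl hlen
      (fun q hq => hpos q.2 (pv_snd_mem_take ps ss q hq)),
    List.nil_append]
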